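-- pv_equiv track=rewrite | github.com/dLswStudy/pythonAlgo | 1주차/5일차/5-4.py | cnt2orMore
-- ===== SOURCE A (Python) =====
-- def cnt2orMore(row, char):
--     cnt = 0
--     n = len(row)
--     i = 0
--
--     while i < n:
--         if char == row[i]:
--             # 연속된 . 개수 구하기
--             pointNum = 0
--             while i+pointNum < n and char == row[i+pointNum]:
--                 pointNum += 1
--             # .이 2번 이상 연속한 상태면 카운팅
--             if pointNum >= 2:
--                 cnt += 1
--             # 다음 문자로 넘어가기
--             i += pointNum
--         else:
--             i += 1
--
--     return cnt
-- ===== SOURCE B (Python) =====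
-- def cnt2orMore(row, char):
--     pairs = sum(1 for a, b in zip(row, row[1:]) if a == char == b)
--     triples = sum(1 for a, b, c in zip(row, row[1:], row[2:]) if a == char == b == c)
--     return pairs - triples
-- ===== Notes on version B (the rewrite author's own statement) =====
-- stated objective: alternative
-- what changed: B never finds runs at all: it computes the answer by inclusion-exclusion over sliding windows, counting adjacent matching pairs minus adjacent matching triples (each maximal run of length L>=2 contributes (L-1)-(L-2)=1), instead of A's index-advancing run scan.
import Mathlib
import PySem

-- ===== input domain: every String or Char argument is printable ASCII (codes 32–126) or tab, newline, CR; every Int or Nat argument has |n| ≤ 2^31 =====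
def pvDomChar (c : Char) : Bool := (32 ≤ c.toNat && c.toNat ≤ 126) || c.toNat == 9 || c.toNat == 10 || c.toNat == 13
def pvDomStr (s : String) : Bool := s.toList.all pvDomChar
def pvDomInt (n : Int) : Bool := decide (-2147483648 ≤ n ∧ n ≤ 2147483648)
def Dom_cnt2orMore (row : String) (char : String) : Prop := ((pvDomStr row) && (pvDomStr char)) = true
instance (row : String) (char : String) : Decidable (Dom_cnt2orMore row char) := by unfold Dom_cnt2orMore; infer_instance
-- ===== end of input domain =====

-- B replaces A's index-advancing run scan by window inclusion–exclusion:
-- (# adjacent matching pairs) − (# adjacent matching triples); objective: alternative.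


-- ===== PORT A =====
-- inner while: length of the run at the front whose characters x satisfy char == x
def pvRunLen (cl : List Char) : List Char → Nat
  | [] => 0
  | x :: xs => if cl = [x] then pvRunLen cl xs + 1 else 0

-- outer while over index i, as structural recursion on the remaining suffix
def pvLoopA (cl : List Char) : List Char → Int
  | [] => 0
  | x :: xs =>
    if cl = [x] then
      let p := 1 + pvRunLen cl xs
      (if 2 ≤ p then 1 else 0) + pvLoopA cl (xs.drop (p - 1))
    else
      pvLoopA cl xs
termination_by l => l.length
decreasing_by
  all_goals simp [List.length_drop]

def cnt2orMore (row : String) (char : String) : Int :=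
  pvLoopA char.toList row.toList

-- ===== PORT B =====
-- sum over zip(row, row[1:]): sliding window of adjacent pairs
def pvPairs (cl : List Char) : List Char → Nat
  | x :: y :: ys => (if cl = [x] ∧ cl = [y] then 1 else 0) + pvPairs cl (y :: ys)
  | _ => 0

-- sum over zip(row, row[1:], row[2:]): sliding window of adjacent triples
def pvTriples (cl : List Char) : List Char → Nat
  | x :: y :: z :: zs => (if cl = [x] ∧ cl = [y] ∧ cl = [z] then 1 else 0) + pvTriples cl (y :: z :: zs)
  | _ => 0

def cnt2orMore_alt (row : String) (char : String) : Int :=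
  (pvPairs char.toList row.toList : Int) - (pvTriples char.toList row.toList : Int)

-- ===== PRECONDITION & SPEC =====
def Spec_cnt2orMore (row : String) (char : String) (out : Int) : Prop := out = cnt2orMore_alt row char
instance (row : String) (char : String) (out : Int) : Decidable (Spec_cnt2orMore row char out) := by unfold Spec_cnt2orMore; infer_instance

-- ===== CLAIM (what is proved, stated in full; the proofs are below) =====
def Claim_equal_cnt2orMore : Prop := ∀ (row : String) (char : String), Dom_cnt2orMore row char → Spec_cnt2orMore row char (cnt2orMore row char)

-- ===== LEMMAS AND PROOFS =====

-- a non-matching head is invisible to the pair count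
theorem pvPairs_skip (cl : List Char) (x : Char) (hx : cl ≠ [x]) (xs : List Char) :
    pvPairs cl (x :: xs) = pvPairs cl xs := by
  cases xs with
  | nil => simp [pvPairs]
  | cons y ys => simp [pvPairs, hx]

-- a non-matching head is invisible to the triple count
theorem pvTriples_skip (cl : List Char) (x : Char) (hx : cl ≠ [x]) (xs : List Char) :
    pvTriples cl (x :: xs) = pvTriples cl xs := by
  match xs with
  | [] => simp [pvTriples]
  | [y] => simp [pvTriples]
  | y :: z :: zs => simp [pvTriples, hx]

-- pair count across a maximal matching run: r pairs, then the rest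
theorem pvPairs_run (cl : List Char) (x : Char) (hx : cl = [x]) :
    ∀ xs, pvPairs cl (x :: xs) = pvRunLen cl xs + pvPairs cl (xs.drop (pvRunLen cl xs)) := by
  intro xs
  induction xs with
  | nil => simp [pvPairs, pvRunLen]
  | cons y ys ih =>
    by_cases hy : cl = [y]
    · have hxy : y = x := by have := hx ▸ hy; simpa using this.symm
      subst hxy
      rw [pvPairs, pvRunLen, if_pos hy, if_pos ⟨hx, hy⟩]
      rw [ih]
      simp [List.drop_succ_cons]
      omega
    · rw [pvPairs, pvRunLen, if_neg hy, if_neg (by tauto)]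
      simp

-- triple count across a maximal matching run: r − 1 triples (0 if r = 0), then the rest
theorem pvTriples_run (cl : List Char) (x : Char) (hx : cl = [x]) :
    ∀ xs, pvTriples cl (x :: xs) = (pvRunLen cl xs - 1) + pvTriples cl (xs.drop (pvRunLen cl xs)) := by
  intro xs
  induction xs with
  | nil => simp [pvTriples, pvRunLen]
  | cons y ys ih =>
    by_cases hy : cl = [y]
    · have hxy : x = y := by have := hx ▸ hy; simpa using this
      subst hxy
      rw [pvRunLen, if_pos hy]
      cases ys with
      | nil => simp [pvTriples, pvRunLen]
      | cons z zs =>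
        by_cases hz : cl = [z]
        · have hxz : x = z := by have := hx ▸ hz; simpa using this
          subst hxz
          rw [pvTriples, if_pos ⟨hx, hy, hz⟩, ih]
          simp only [pvRunLen, if_pos hz, List.drop_succ_cons]
          omega
        · rw [pvTriples, if_neg (by tauto), ih]
          simp [pvRunLen, hz]
    · rw [pvRunLen, if_neg hy]
      simp only [Nat.zero_sub, List.drop_zero, Nat.zero_add]
      cases ys with
      | nil => simp [pvTriples]
      | cons z zs =>
        rw [pvTriples, if_neg (by tauto)]
        simp

-- main invariant: A's loop equals pairs − triples on any suffix
theorem pvLoopA_eq (cl : List Char) : ∀ l : List Char,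
    pvLoopA cl l = (pvPairs cl l : Int) - (pvTriples cl l : Int) := by
  intro l
  induction hn : l.length using Nat.strong_induction_on generalizing l with
  | _ n ih =>
    cases l with
    | nil => simp [pvLoopA, pvPairs, pvTriples]
    | cons x xs =>
      by_cases hx : cl = [x]
      · rw [pvLoopA, if_pos hx]
        set r := pvRunLen cl xs with hr
        have hp : 1 + r - 1 = r := by omega
        have hlen : (xs.drop r).length < n := by subst hn; simp [List.length_drop]
        have ihr := ih _ hlen (xs.drop r) rfl
        rw [pvPairs_run cl x hx xs, pvTriples_run cl x hx xs]
        simp only [hp, ← hr, ihr]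
        by_cases h2 : 2 ≤ 1 + r
        · rw [if_pos h2]; push_cast; omega
        · rw [if_neg h2]
          have : r = 0 := by omega
          simp [this]
      · rw [pvLoopA, if_neg hx, pvPairs_skip cl x hx xs, pvTriples_skip cl x hx xs]
        exact ih _ (by subst hn; simp) xs rfl

-- ===== VERDICT (by name: the statement is the Claim_ definition above) =====
theorem cnt2orMore_spec : Claim_equal_cnt2orMore := by
  intro row char _
  unfold Spec_cnt2orMore cnt2orMore cnt2orMore_alt
  exact pvLoopA_eq char.toList row.toList
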